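-- pv_equiv track=rewrite | github.com/Akondltd/radbot | gui/components/token_selection_dialog.py | _sort_tokens_with_xrd_first
-- ===== SOURCE A (Python) =====
-- from typing import List, Dict, Optional, Set
--
-- RADIX_XRD_ADDRESS = "resource_rdx1tknxxxxxxxxxradxrdxxxxxxxxx009923554798xxxxxxxxxradxrd"
--
-- def _sort_tokens_with_xrd_first(tokens: List[Dict]) -> List[Dict]:
--     """
--     Sort tokens with XRD at the top, then alphabetically by symbol.
--     """
--     xrd_tokens = []
--     other_tokens = []
--
--     for token in tokens:
--         symbol = token.get('symbol', '').upper()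
--         address = token.get('address', '')
--
--         is_radix_xrd = (symbol == 'XRD' and address == RADIX_XRD_ADDRESS)
--
--         if is_radix_xrd:
--             xrd_tokens.append(token)
--         else:
--             other_tokens.append(token)
--
--     # Sort other tokens alphabetically by symbol
--     other_tokens.sort(key=lambda t: t.get('symbol', '').upper())
--
--     return xrd_tokens + other_tokens
-- ===== SOURCE B (Python) =====
-- RADIX_XRD_ADDRESS = "resource_rdx1tknxxxxxxxxxradxrdxxxxxxxxx009923554798xxxxxxxxxradxrd"
--
-- def _sort_tokens_with_xrd_first(tokens):
--     """
--     Sort tokens with XRD at the top, then alphabetically by symbol: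
--     one stable sorted() call on a composite key (XRD rank, upper-cased symbol).
--     """
--     def key(token):
--         symbol = token.get('symbol', '').upper()
--         is_radix_xrd = (symbol == 'XRD' and token.get('address', '') == RADIX_XRD_ADDRESS)
--         return (0 if is_radix_xrd else 1, symbol)
--
--     return sorted(tokens, key=key)
-- ===== Notes on version B (the rewrite author's own statement) =====
-- stated objective: idiomatic
-- what changed: Replaces the explicit partition into xrd/other lists, separate sort of the others and concatenation with a single stable sorted() call on a composite key (0 for the Radix XRD token else 1, then the upper-cased symbol).
import Mathlib
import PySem

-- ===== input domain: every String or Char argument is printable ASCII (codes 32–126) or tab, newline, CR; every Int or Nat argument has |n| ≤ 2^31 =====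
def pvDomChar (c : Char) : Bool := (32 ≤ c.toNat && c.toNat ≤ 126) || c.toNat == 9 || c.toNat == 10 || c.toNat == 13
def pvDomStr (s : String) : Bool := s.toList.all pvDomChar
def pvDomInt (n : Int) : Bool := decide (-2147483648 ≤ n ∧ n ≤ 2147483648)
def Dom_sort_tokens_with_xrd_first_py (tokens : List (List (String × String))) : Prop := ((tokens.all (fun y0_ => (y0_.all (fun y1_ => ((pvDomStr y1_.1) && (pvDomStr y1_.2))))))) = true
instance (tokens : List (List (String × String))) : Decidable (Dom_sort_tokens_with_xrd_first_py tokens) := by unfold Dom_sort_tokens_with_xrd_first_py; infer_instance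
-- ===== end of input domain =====

-- B replaces A's partition-into-two-lists + separate sort + concatenation by a single
-- stable sort on a composite key (XRD rank, upper-cased symbol): more idiomatic, same cost.


def RADIX_XRD_ADDRESS : String := "resource_rdx1tknxxxxxxxxxradxrdxxxxxxxxx009923554798xxxxxxxxxradxrd"

-- ===== PORT A =====
-- partition loop, then sort the non-XRD tokens by upper-cased symbol, then concatenate
def sort_tokens_with_xrd_first_py (tokens : List (List (String × String))) : List (List (String × String)) :=
  let p := tokens.foldl (fun (acc : List (List (String × String)) × List (List (String × String))) token =>
    let symbol := PySem.Str.upper (PySem.Dict.getD ⟨token⟩ "symbol" "")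
    let address := PySem.Dict.getD (⟨token⟩ : PySem.Dict String String) "address" ""
    let is_radix_xrd := symbol == "XRD" && address == RADIX_XRD_ADDRESS
    if is_radix_xrd then (acc.1 ++ [token], acc.2) else (acc.1, acc.2 ++ [token]))
    ([], [])
  p.1 ++ PySem.List.sorted p.2 (fun t => PySem.Str.upper (PySem.Dict.getD ⟨t⟩ "symbol" ""))

-- ===== PORT B =====
-- one stable sort with the composite key (rank, upper-cased symbol)
def sort_tokens_with_xrd_first_py_alt (tokens : List (List (String × String))) : List (List (String × String)) :=
  PySem.List.sorted2 tokens
    (fun token =>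
      let symbol := PySem.Str.upper (PySem.Dict.getD ⟨token⟩ "symbol" "")
      if symbol == "XRD" && PySem.Dict.getD (⟨token⟩ : PySem.Dict String String) "address" "" == RADIX_XRD_ADDRESS
      then (0 : Int) else 1)
    (fun token => PySem.Str.upper (PySem.Dict.getD ⟨token⟩ "symbol" ""))

-- ===== PRECONDITION & SPEC =====
def Spec_sort_tokens_with_xrd_first_py (tokens : List (List (String × String))) (out : List (List (String × String))) : Prop := out = sort_tokens_with_xrd_first_py_alt tokens
instance (tokens : List (List (String × String))) (out : List (List (String × String))) : Decidable (Spec_sort_tokens_with_xrd_first_py tokens out) := by unfold Spec_sort_tokens_with_xrd_first_py; infer_instance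

-- ===== CLAIM (what is proved, stated in full; the proofs are below) =====
def Claim_equal_sort_tokens_with_xrd_first_py : Prop := ∀ (tokens : List (List (String × String))), Dom_sort_tokens_with_xrd_first_py tokens → Spec_sort_tokens_with_xrd_first_py tokens (sort_tokens_with_xrd_first_py tokens)

-- ===== LEMMAS AND PROOFS =====

-- the upper-cased symbol of a token
def pvSym (t : List (String × String)) : String :=
  PySem.Str.upper (PySem.Dict.getD ⟨t⟩ "symbol" "")

-- the is-Radix-XRD predicate both programs test
def pvIsXrd (t : List (String × String)) : Bool :=
  pvSym t == "XRD" && PySem.Dict.getD (⟨t⟩ : PySem.Dict String String) "address" "" == RADIX_XRD_ADDRESS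

-- the lexicographic before-relation of B's composite-key stable sort
def pvBefore (a b : List (String × String)) : Bool :=
  decide ((if pvIsXrd a then (0:Int) else 1) < (if pvIsXrd b then (0:Int) else 1)) ||
  (!decide ((if pvIsXrd b then (0:Int) else 1) < (if pvIsXrd a then (0:Int) else 1)) &&
   decide (pvSym a < pvSym b))

lemma insertBy_append_left {α : Type} (before : α → α → Bool) (x : α) (F S : List α)
    (h : ∀ y ∈ F, before x y = false) :
    PySem.List.insertBy before x (F ++ S) = F ++ PySem.List.insertBy before x S := by
  induction F with
  | nil => rfl
  | cons f fs ih =>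
    have hf : before x f = false := h f (by simp)
    simp [PySem.List.insertBy, hf, ih (fun y hy => h y (by simp [hy]))]

lemma insertBy_congr {α : Type} (b1 b2 : α → α → Bool) (x : α) (S : List α)
    (h : ∀ y ∈ S, b1 x y = b2 x y) :
    PySem.List.insertBy b1 x S = PySem.List.insertBy b2 x S := by
  induction S with
  | nil => rfl
  | cons s ss ih =>
    have hs : b1 x s = b2 x s := h s (by simp)
    by_cases hb : b2 x s = true
    · simp [PySem.List.insertBy, hs, hb]
    · simp only [Bool.not_eq_true] at hb
      simp [PySem.List.insertBy, hs, hb, ih (fun y hy => h y (by simp [hy]))]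

lemma insertBy_cons_head_true {α : Type} (before : α → α → Bool) (x s : α) (S : List α)
    (h : before x s = true) :
    PySem.List.insertBy before x (s :: S) = x :: s :: S := by
  simp [PySem.List.insertBy, h]

-- invariant of A's partition loop
lemma partitionA_eq (tokens : List (List (String × String))) :
    ∀ (a b : List (List (String × String))),
    tokens.foldl (fun acc token =>
      let symbol := PySem.Str.upper (PySem.Dict.getD ⟨token⟩ "symbol" "")
      let address := PySem.Dict.getD (⟨token⟩ : PySem.Dict String String) "address" ""
      let is_radix_xrd := symbol == "XRD" && address == RADIX_XRD_ADDRESS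
      if is_radix_xrd then (acc.1 ++ [token], acc.2) else (acc.1, acc.2 ++ [token])) (a, b)
    = (a ++ tokens.filter pvIsXrd, b ++ tokens.filter (fun t => !pvIsXrd t)) := by
  induction tokens with
  | nil => simp
  | cons t ts ih =>
    intro a b
    rw [List.foldl_cons]
    by_cases h : pvIsXrd t = true
    · have hstep : (let symbol := PySem.Str.upper (PySem.Dict.getD ⟨t⟩ "symbol" "")
          let address := PySem.Dict.getD (⟨t⟩ : PySem.Dict String String) "address" ""
          let is_radix_xrd := symbol == "XRD" && address == RADIX_XRD_ADDRESS
          if is_radix_xrd = true then (((a, b) : List (List (String × String)) × List (List (String × String))).1 ++ [t], (a, b).2)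
          else ((a, b).1, (a, b).2 ++ [t]))
          = ((a ++ [t], b) : List (List (String × String)) × List (List (String × String))) := by
        have h' : PySem.Str.upper (PySem.Dict.getD ⟨t⟩ "symbol" "") = "XRD" ∧
            PySem.Dict.getD (⟨t⟩ : PySem.Dict String String) "address" "" = RADIX_XRD_ADDRESS := by
          simpa [pvIsXrd, pvSym] using h
        simp [h'.1, h'.2]
      rw [hstep, ih]
      simp [h]
    · simp only [Bool.not_eq_true] at h
      have hstep : (let symbol := PySem.Str.upper (PySem.Dict.getD ⟨t⟩ "symbol" "")
          let address := PySem.Dict.getD (⟨t⟩ : PySem.Dict String String) "address" ""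
          let is_radix_xrd := symbol == "XRD" && address == RADIX_XRD_ADDRESS
          if is_radix_xrd = true then (((a, b) : List (List (String × String)) × List (List (String × String))).1 ++ [t], (a, b).2)
          else ((a, b).1, (a, b).2 ++ [t]))
          = ((a, b ++ [t]) : List (List (String × String)) × List (List (String × String))) := by
        have h' : ¬ (PySem.Str.upper (PySem.Dict.getD ⟨t⟩ "symbol" "") = "XRD" ∧
            PySem.Dict.getD (⟨t⟩ : PySem.Dict String String) "address" "" = RADIX_XRD_ADDRESS) := by
          simpa [pvIsXrd, pvSym] using h
        simp [h']
      rw [hstep, ih]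
      simp [h]

lemma sym_of_isXrd {t : List (String × String)} (h : pvIsXrd t = true) : pvSym t = "XRD" := by
  unfold pvIsXrd at h
  exact eq_of_beq (Bool.and_elim_left h)

-- elements of B's accumulator: compare with an XRD token / with a non-XRD token
lemma before_xrd_xrd {x y : List (String × String)} (hx : pvIsXrd x = true) (hy : pvIsXrd y = true) :
    pvBefore x y = false := by
  simp [pvBefore, hx, hy, sym_of_isXrd hx, sym_of_isXrd hy]

lemma before_xrd_other {x y : List (String × String)} (hx : pvIsXrd x = true) (hy : pvIsXrd y = false) :
    pvBefore x y = true := by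
  simp [pvBefore, hx, hy]

lemma before_other_xrd {x y : List (String × String)} (hx : pvIsXrd x = false) (hy : pvIsXrd y = true) :
    pvBefore x y = false := by
  simp [pvBefore, hx, hy]

lemma before_other_other {x y : List (String × String)} (hx : pvIsXrd x = false) (hy : pvIsXrd y = false) :
    pvBefore x y = decide (pvSym x < pvSym y) := by
  simp [pvBefore, hx, hy]

-- the heart of the proof: B's single stable composite-key sort is A's partition-sort-concatenate
lemma sorted2_eq_partition (tokens : List (List (String × String))) :
    PySem.List.sorted2 tokens (fun t => if pvIsXrd t then (0:Int) else 1) pvSym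
    = tokens.filter pvIsXrd ++
      PySem.List.sorted (tokens.filter (fun t => !pvIsXrd t)) pvSym := by
  induction tokens using List.reverseRecOn with
  | nil => rfl
  | append_singleton ts x ih =>
    have hs2 : ∀ (l : List (List (String × String))),
        PySem.List.sorted2 l (fun t => if pvIsXrd t then (0:Int) else 1) pvSym
        = l.foldl (fun acc x => PySem.List.insertBy pvBefore x acc) [] := by
      intro l; rfl
    rw [hs2] at ih ⊢
    rw [List.foldl_append, List.foldl_cons, List.foldl_nil, ih]
    have hmemF : ∀ y ∈ ts.filter pvIsXrd, pvIsXrd y = true := by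
      intro y hy; exact (List.mem_filter.mp hy).2
    have hmemS : ∀ y ∈ PySem.List.sorted (ts.filter (fun t => !pvIsXrd t)) pvSym, pvIsXrd y = false := by
      intro y hy
      have := (PySem.List.mem_sorted _ _ _ _).mp hy
      simpa using (List.mem_filter.mp this).2
    by_cases hx : pvIsXrd x = true
    · -- x is the Radix XRD token: goes right after the previous XRD tokens
      have h1 : ∀ y ∈ ts.filter pvIsXrd, pvBefore x y = false :=
        fun y hy => before_xrd_xrd hx (hmemF y hy)
      rw [insertBy_append_left _ _ _ _ h1]
      have h2 : PySem.List.insertBy pvBefore x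
          (PySem.List.sorted (ts.filter (fun t => !pvIsXrd t)) pvSym)
          = x :: PySem.List.sorted (ts.filter (fun t => !pvIsXrd t)) pvSym := by
        cases hS : PySem.List.sorted (ts.filter (fun t => !pvIsXrd t)) pvSym with
        | nil => rfl
        | cons s ss =>
          exact insertBy_cons_head_true _ _ _ _
            (before_xrd_other hx (hmemS s (by rw [hS]; simp)))
      rw [h2]
      simp [List.filter_append, hx]
    · -- x is an ordinary token: inserted into the sorted others by symbol
      simp only [Bool.not_eq_true] at hx
      have h1 : ∀ y ∈ ts.filter pvIsXrd, pvBefore x y = false :=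
        fun y hy => before_other_xrd hx (hmemF y hy)
      rw [insertBy_append_left _ _ _ _ h1]
      have h2 : PySem.List.insertBy pvBefore x
          (PySem.List.sorted (ts.filter (fun t => !pvIsXrd t)) pvSym)
          = PySem.List.insertBy (fun a b => decide (pvSym a < pvSym b)) x
            (PySem.List.sorted (ts.filter (fun t => !pvIsXrd t)) pvSym) :=
        insertBy_congr _ _ _ _ (fun y hy => before_other_other hx (hmemS y hy))
      rw [h2]
      have h3 : PySem.List.sorted ((ts ++ [x]).filter (fun t => !pvIsXrd t)) pvSym
          = PySem.List.insertBy (fun a b => decide (pvSym a < pvSym b)) x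
            (PySem.List.sorted (ts.filter (fun t => !pvIsXrd t)) pvSym) := by
        rw [List.filter_append]
        simp only [List.filter_cons, hx]
        rw [PySem.List.sorted_eq_foldl_insertBy, PySem.List.sorted_eq_foldl_insertBy,
          List.foldl_append]
        rfl
      rw [h3]
      simp [List.filter_append, hx]

-- ===== VERDICT (by name: the statement is the Claim_ definition above) =====
theorem sort_tokens_with_xrd_first_py_spec : Claim_equal_sort_tokens_with_xrd_first_py := by
  intro tokens _
  unfold Spec_sort_tokens_with_xrd_first_py sort_tokens_with_xrd_first_py sort_tokens_with_xrd_first_py_alt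
  have hp := partitionA_eq tokens [] []
  simp only [List.nil_append] at hp
  rw [hp]
  exact (sorted2_eq_partition tokens).symm
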